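-- pv_equiv track=rewrite | github.com/BeatrizBL/Adventofcode_2019 | src/day3.py | get_panel_dimension
-- ===== SOURCE A (Python) =====
-- from typing import List
--
-- def get_panel_dimension(path: List[str]) -> int:
--     """
--     Gets the maximum number of steps the wire takes in any
--     of the four directions.
--     """
--
--     def _sum_steps(direction) -> int:
--         steps = [int(s[1:]) for s in path if s[0] == direction]
--         return sum(steps)
--
--     right = _sum_steps('R')
--     left = _sum_steps('L')
--     up = _sum_steps('U')
--     down = _sum_steps('D')
--
--     return max(right, left, up, down)
-- ===== SOURCE B (Python) =====
-- def get_panel_dimension(path):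
--     """
--     Gets the maximum number of steps the wire takes in any
--     of the four directions.
--     """
--     totals = {}
--     for s in path:
--         c = s[0]
--         if c in 'RLUD':
--             totals[c] = totals.get(c, 0) + int(s[1:])
--     return max(totals.get(d, 0) for d in 'RLUD')
-- ===== Notes on version B (the rewrite author's own statement) =====
-- stated objective: idiomatic
-- what changed: B makes a single pass over path accumulating per-direction totals in a dict, then takes the max over the four direction keys, instead of A's four separate filter-and-sum passes over the whole list.
import Mathlib
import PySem

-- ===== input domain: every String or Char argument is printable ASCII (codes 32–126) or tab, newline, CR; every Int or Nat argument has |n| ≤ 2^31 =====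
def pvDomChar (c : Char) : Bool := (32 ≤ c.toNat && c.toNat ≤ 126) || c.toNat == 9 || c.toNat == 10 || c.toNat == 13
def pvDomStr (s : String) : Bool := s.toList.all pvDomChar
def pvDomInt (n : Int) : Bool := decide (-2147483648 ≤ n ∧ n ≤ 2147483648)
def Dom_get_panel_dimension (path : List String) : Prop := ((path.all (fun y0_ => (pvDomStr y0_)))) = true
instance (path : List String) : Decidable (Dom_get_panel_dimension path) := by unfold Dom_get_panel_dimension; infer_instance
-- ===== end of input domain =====

-- B builds the per-direction totals in one pass over `path` with a dict keyed by the
-- direction letter, instead of A's four separate filter-and-sum passes (objective: idiomatic).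

-- ===== PORT A =====
-- helper _sum_steps (closes over path in Python; passed explicitly here)
def pvSumSteps (path : List String) (direction : Char) : Int :=
  (((path.filter (fun s => PySem.Str.pyGet? s 0 == some direction)).map
      (fun s => (PySem.Int.ofStr? (PySem.Str.slice s (some 1) none)).getD 0))).sum

def get_panel_dimension (path : List String) : Int :=
  let right := pvSumSteps path 'R'
  let left := pvSumSteps path 'L'
  let up := pvSumSteps path 'U'
  let down := pvSumSteps path 'D'
  max right (max left (max up down))

-- ===== PORT B =====
-- one loop iteration: add int(s[1:]) to totals[s[0]] when s[0] is a direction letter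
def pvAccum (d : PySem.Dict Char Int) (s : String) : PySem.Dict Char Int :=
  match PySem.Str.pyGet? s 0 with
  | some c =>
      if c ∈ ['R', 'L', 'U', 'D'] then
        d.insert c (d.getD c 0 + (PySem.Int.ofStr? (PySem.Str.slice s (some 1) none)).getD 0)
      else d
  | none => d

def get_panel_dimension_alt (path : List String) : Int :=
  let totals := path.foldl pvAccum PySem.Dict.empty
  ((PySem.List.max? ((['R', 'L', 'U', 'D']).map (fun c => totals.getD c 0)) (fun y => y)).getD 0)

-- ===== PRECONDITION & SPEC =====
-- Pre_ excludes exactly the inputs where Python A raises: an empty string (IndexError on s[0])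
-- or an entry starting with R/L/U/D whose tail is not a valid int literal (ValueError).
def Pre_get_panel_dimension (path : List String) : Prop :=
  ∀ s ∈ path, s.toList ≠ [] ∧
    (s.toList.head? ∈ [some 'R', some 'L', some 'U', some 'D'] →
      (PySem.Int.ofStr? (PySem.Str.slice s (some 1) none)).isSome = true)
instance (path : List String) : Decidable (Pre_get_panel_dimension path) := by
  unfold Pre_get_panel_dimension; infer_instance

def pvWitness_get_panel_dimension : List String := ["R8", "U5", "L5", "D3", "X9"]

def Spec_get_panel_dimension (path : List String) (out : Int) : Prop := out = get_panel_dimension_alt path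
instance (path : List String) (out : Int) : Decidable (Spec_get_panel_dimension path out) := by
  unfold Spec_get_panel_dimension; infer_instance

-- ===== CLAIM (what is proved, stated in full; the proofs are below) =====
def Claim_equal_get_panel_dimension : Prop := ∀ (path : List String), Dom_get_panel_dimension path → Pre_get_panel_dimension path → Spec_get_panel_dimension path (get_panel_dimension path)

-- ===== LEMMAS AND PROOFS =====

-- loop invariant: after folding pvAccum over path, the total stored for a direction
-- letter c is the starting value plus A's filtered sum for c
lemma pvAccum_getD (c : Char) (hc : c ∈ ['R', 'L', 'U', 'D']) :
    ∀ (path : List String) (d0 : PySem.Dict Char Int),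
      (path.foldl pvAccum d0).getD c 0 = d0.getD c 0 + pvSumSteps path c := by
  intro path
  induction path with
  | nil => intro d0; simp [pvSumSteps]
  | cons s rest ih =>
    intro d0
    simp only [List.foldl_cons, ih]
    have hsum : pvSumSteps (s :: rest) c =
        (if PySem.Str.pyGet? s 0 == some c then
          (PySem.Int.ofStr? (PySem.Str.slice s (some 1) none)).getD 0 else 0)
        + pvSumSteps rest c := by
      simp only [pvSumSteps, List.filter_cons]
      split <;> simp
    rw [hsum]
    unfold pvAccum
    cases h : PySem.Str.pyGet? s 0 with
    | none => simp
    | some c0 =>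
      by_cases hm : c0 ∈ ['R', 'L', 'U', 'D']
      · simp only [if_pos hm, PySem.Dict.getD_insert]
        by_cases hcc : c = c0
        · subst hcc; simp; ring
        · have : ¬ ((some c0 : Option Char) == some c) = true := by
            simp [Ne.symm hcc]
          simp [hcc, this]
      · have hne : c0 ≠ c := fun h' => hm (h' ▸ hc)
        have : ¬ ((some c0 : Option Char) == some c) = true := by simp [hne]
        simp [hm, this]

lemma pv_totals (path : List String) (c : Char) (hc : c ∈ ['R', 'L', 'U', 'D']) :
    (path.foldl pvAccum PySem.Dict.empty).getD c 0 = pvSumSteps path c := by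
  have := pvAccum_getD c hc path PySem.Dict.empty
  simpa [PySem.Dict.getD, PySem.Dict.get?, PySem.Dict.empty] using this

-- ===== VERDICT (by name: the statement is the Claim_ definition above) =====
theorem get_panel_dimension_spec : Claim_equal_get_panel_dimension := by
  intro path _ _
  unfold Spec_get_panel_dimension get_panel_dimension get_panel_dimension_alt
  simp only [List.map, PySem.List.max?_id_cons, Option.getD_some]
  rw [pv_totals path 'R' (by simp), pv_totals path 'L' (by simp),
      pv_totals path 'U' (by simp), pv_totals path 'D' (by simp)]
  simp only [List.foldl]
  omega
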